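-- pv_equiv track=rewrite | github.com/shreya0505/LifeOS | core/saga.py | _recovery_distances
-- ===== SOURCE A (Python) =====
-- def _recovery_distances(day_profiles: list[dict]) -> list[int]:
--     recoveries: list[int] = []
--     for idx, day in enumerate(day_profiles[:-1]):
--         if day["saga"]["mood_load"] < 65:
--             continue
--         for distance, future in enumerate(day_profiles[idx + 1: idx + 5], start=1):
--             if future["saga"]["mood_load"] < 55:
--                 recoveries.append(distance)
--                 break
--     return recoveries
-- ===== SOURCE B (Python) =====
-- def _recovery_distances(day_profiles: list[dict]) -> list[int]:
--     # Mood load of a day, or None when the day carries no mood data.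
--     def mood(day):
--         return day.get("saga", {}).get("mood_load")
--     # Reverse pass: next_low[i] = index of nearest day j > i with mood_load < 55 (or None).
--     nearest = None
--     next_low = []
--     for i in range(len(day_profiles) - 1, -1, -1):
--         m = mood(day_profiles[i])
--         next_low.append(nearest)
--         if m is not None and m < 55:
--             nearest = i
--     next_low.reverse()
--     # Forward pass: a high-load day recovers at distance next_low[i] - i if that is at most 4.
--     out = []
--     for i, (day, j) in enumerate(zip(day_profiles, next_low)):
--         m = mood(day)
--         if m is not None and m >= 65 and j is not None and j - i <= 4:
--             out.append(j - i)
--     return out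
-- ===== Notes on version B (the rewrite author's own statement) =====
-- stated objective: alternative
-- what changed: Replaces A's per-high-day bounded rescan of the next four days with a reverse pass that builds a next-low index table and a forward pass that reads it.
import Mathlib
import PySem

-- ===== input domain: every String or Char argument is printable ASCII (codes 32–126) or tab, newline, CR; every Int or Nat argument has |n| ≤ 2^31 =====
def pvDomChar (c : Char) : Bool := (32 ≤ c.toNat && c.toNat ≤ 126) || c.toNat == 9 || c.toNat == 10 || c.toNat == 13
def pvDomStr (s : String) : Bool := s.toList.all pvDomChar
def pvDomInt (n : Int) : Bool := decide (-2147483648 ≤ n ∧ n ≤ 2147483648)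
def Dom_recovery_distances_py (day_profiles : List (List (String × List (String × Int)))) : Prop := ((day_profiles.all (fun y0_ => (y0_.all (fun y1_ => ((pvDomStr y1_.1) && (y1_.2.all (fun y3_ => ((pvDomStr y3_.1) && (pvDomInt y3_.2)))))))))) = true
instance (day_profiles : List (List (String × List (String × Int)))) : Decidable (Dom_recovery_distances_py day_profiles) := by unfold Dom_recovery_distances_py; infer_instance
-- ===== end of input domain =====

-- B replaces A's per-high-day rescan of the next four days by a next-low index table built in one
-- reverse pass and read in one forward pass (objective: alternative decomposition, not faster);
-- where Python A raises KeyError on a day without mood data (outside Pre_), B skips that day.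

-- ===== PORT A =====
-- day["saga"]["mood_load"]; none = Python's KeyError path, which Pre_ keeps A's control flow away from
def pvMood? (day : List (String × List (String × Int))) : Option Int :=
  (PySem.Dict.get? (PySem.Dict.mk day) "saga").bind
    (fun s => PySem.Dict.get? (PySem.Dict.mk s) "mood_load")

-- day["saga"]["mood_load"] < 55 (A) / 'm is not None and m < 55' (B); none counts as false
def pvLow (day : List (String × List (String × Int))) : Bool :=
  match pvMood? day with
  | some m => decide (m < 55)
  | none => false

-- not (day["saga"]["mood_load"] < 65) (A) / 'm is not None and m >= 65' (B); none counts as false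
def pvHigh (day : List (String × List (String × Int))) : Bool :=
  match pvMood? day with
  | some m => decide (65 ≤ m)
  | none => false

-- inner 'for distance, future in enumerate(day_profiles[idx+1:idx+5], start=1): … break'
def pvScanA (recoveries : List Int) (distance : Int)
    (window : List (List (String × List (String × Int)))) : List Int :=
  match window with
  | [] => recoveries
  | future :: rest =>
    if pvLow future then recoveries ++ [distance]
    else pvScanA recoveries (distance + 1) rest

-- body of A's outer loop ('if day["saga"]["mood_load"] < 65: continue')
def pvBodyA (day_profiles : List (List (String × List (String × Int))))
    (recoveries : List Int) (p : Int × List (String × List (String × Int))) : List Int :=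
  if pvHigh p.2 then
    pvScanA recoveries 1 (PySem.List.slice day_profiles (some (p.1 + 1)) (some (p.1 + 5)))
  else recoveries

def recovery_distances_py (day_profiles : List (List (String × List (String × Int)))) : List Int :=
  (PySem.List.enumerate (PySem.List.slice day_profiles none (some (-1))) 0).foldl
    (pvBodyA day_profiles) []

-- ===== PORT B =====
-- body of B's reverse pass: append current nearest, then update it at a low day
def pvBodyRev (day_profiles : List (List (String × List (String × Int))))
    (st : List (Option Int) × Option Int) (i : Int) : List (Option Int) × Option Int :=
  let nl := st.1 ++ [st.2]
  if pvLow (PySem.List.pyGetD day_profiles i []) then (nl, some i) else (nl, st.2)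

-- body of B's forward pass
def pvBodyFwd (out : List Int)
    (p : Int × (List (String × List (String × Int)) × Option Int)) : List Int :=
  if pvHigh p.2.1 then
    match p.2.2 with
    | none => out
    | some j => if j - p.1 ≤ 4 then out ++ [j - p.1] else out
  else out

def recovery_distances_py_alt (day_profiles : List (List (String × List (String × Int)))) : List Int :=
  let n : Int := day_profiles.length
  let st := (PySem.List.pyRange (n - 1) (-1) (-1)).foldl (pvBodyRev day_profiles) ([], none)
  let next_low := st.1.reverse
  (PySem.List.enumerate (day_profiles.zip next_low) 0).foldl pvBodyFwd []

-- ===== PRECONDITION & SPEC =====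
-- day carries mood data: day["saga"]["mood_load"] exists
def pvWf (day : List (String × List (String × Int))) : Bool :=
  (pvMood? day).isSome

-- Pre_ is exactly the set of inputs on which Python A returns (elsewhere it raises KeyError):
-- every day except possibly the last must carry ["saga"]["mood_load"], and a last day without it is
-- allowed only if no high-load day whose 4-day window reaches the last day scans that far (each such
-- high day must hit a low day strictly before the last one).
def Pre_recovery_distances_py (day_profiles : List (List (String × List (String × Int)))) : Prop :=
  day_profiles.dropLast.all pvWf = true ∧
  (day_profiles.length ≤ 1 ∨ pvWf (day_profiles.getD (day_profiles.length - 1) []) = true ∨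
    ∀ i ∈ List.range day_profiles.length,
      (day_profiles.length ≤ i + 5 ∧ i < day_profiles.length - 1 ∧
        pvHigh (day_profiles.getD i []) = true) →
      ∃ j ∈ List.range day_profiles.length,
        i < j ∧ j < day_profiles.length - 1 ∧ j ≤ i + 4 ∧
        pvLow (day_profiles.getD j []) = true)
instance (day_profiles : List (List (String × List (String × Int)))) : Decidable (Pre_recovery_distances_py day_profiles) := by unfold Pre_recovery_distances_py; infer_instance

def pvWitness_recovery_distances_py : (List (List (String × List (String × Int)))) :=
  [[("saga", [("mood_load", 70)])], [("saga", [("mood_load", 40)])]]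

def Spec_recovery_distances_py (day_profiles : List (List (String × List (String × Int)))) (out : List Int) : Prop := out = recovery_distances_py_alt day_profiles
instance (day_profiles : List (List (String × List (String × Int)))) (out : List Int) : Decidable (Spec_recovery_distances_py day_profiles out) := by unfold Spec_recovery_distances_py; infer_instance

-- ===== CLAIM (what is proved, stated in full; the proofs are below) =====
def Claim_equal_recovery_distances_py : Prop := ∀ (day_profiles : List (List (String × List (String × Int)))), Dom_recovery_distances_py day_profiles → Pre_recovery_distances_py day_profiles → Spec_recovery_distances_py day_profiles (recovery_distances_py day_profiles)

-- ===== LEMMAS AND PROOFS =====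

-- first-low distance in a window, and the common specification of both programs
def pvFirstLow (d : Int) (w : List (List (String × List (String × Int)))) : List Int :=
  match w with
  | [] => []
  | f :: r => if pvLow f then [d] else pvFirstLow (d + 1) r

def pvSpecF : List (List (String × List (String × Int))) → List Int
  | [] => []
  | d :: rest => (if pvHigh d then pvFirstLow 1 (rest.take 4) else []) ++ pvSpecF rest

-- index of the first low day in l, counting from base b
def pvNextLow : List (List (String × List (String × Int))) → Int → Option Int
  | [], _ => none
  | d :: r, b => if pvLow d then some b else pvNextLow r (b + 1)

-- the next-low table for the suffix of the input starting at index b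
def pvNlTab : List (List (String × List (String × Int))) → Int → List (Option Int)
  | [], _ => []
  | _ :: r, b => pvNextLow r (b + 1) :: pvNlTab r (b + 1)

lemma pvScanA_eq (w : List (List (String × List (String × Int)))) :
    ∀ (recoveries : List Int) (d : Int), pvScanA recoveries d w = recoveries ++ pvFirstLow d w := by
  induction w with
  | nil => intro recs d; simp [pvScanA, pvFirstLow]
  | cons f r ih =>
    intro recs d
    rw [pvScanA, pvFirstLow]
    by_cases h : pvLow f = true
    · simp [h]
    · simp [h, ih]

lemma pvNextLow_ge (w : List (List (String × List (String × Int)))) :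
    ∀ (b j : Int), pvNextLow w b = some j → b ≤ j := by
  induction w with
  | nil => intro b j h; simp [pvNextLow] at h
  | cons f r ih =>
    intro b j h
    rw [pvNextLow] at h
    by_cases hm : pvLow f = true
    · simp [hm] at h; omega
    · simp [hm] at h
      have := ih (b + 1) j h
      omega

lemma pvFirstLow_eq_nextLow (w : List (List (String × List (String × Int)))) :
    ∀ (b : Int) (t : Nat) (d : Int),
      (match pvNextLow w b with
       | none => ([] : List Int)
       | some j => if j < b + (t : Int) then [j - b + d] else []) = pvFirstLow d (w.take t) := by
  induction w with
  | nil => intro b t d; simp [pvNextLow, pvFirstLow]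
  | cons f r ih =>
    intro b t d
    rw [pvNextLow]
    by_cases hm : pvLow f = true
    · rw [if_pos hm]
      cases t with
      | zero => simp [pvFirstLow]
      | succ s =>
        rw [List.take_succ_cons, pvFirstLow, if_pos hm]
        have hlt : b < b + ((s + 1 : Nat) : Int) := by push_cast; omega
        show (if b < b + ((s + 1 : Nat) : Int) then [b - b + d] else []) = [d]
        rw [if_pos hlt]
        simp
    · rw [if_neg hm]
      cases t with
      | zero =>
        rcases hnl : pvNextLow r (b + 1) with _ | j
        · simp [pvFirstLow]
        · have hge := pvNextLow_ge r (b + 1) j hnl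
          show (if j < b + ((0 : Nat) : Int) then [j - b + d] else []) =
            pvFirstLow d (List.take 0 (f :: r))
          rw [if_neg (by push_cast; omega)]
          simp [pvFirstLow]
      | succ s =>
        rw [List.take_succ_cons, pvFirstLow, if_neg hm, ← ih (b + 1) s (d + 1)]
        rcases hnl : pvNextLow r (b + 1) with _ | j
        · simp
        · have h1 : (j < b + ((s + 1 : Nat) : Int)) ↔ (j < b + 1 + ((s : Nat) : Int)) := by
            push_cast; omega
          have h2 : j - b + d = j - (b + 1) + (d + 1) := by ring
          simp only [h1, h2]

lemma pvLoopA (dps : List (List (String × List (String × Int)))) :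
    ∀ (l : List (List (String × List (String × Int)))) (k : Nat) (acc : List Int),
      l = dps.dropLast.drop k →
      (PySem.List.enumerate l (k : Int)).foldl (pvBodyA dps) acc = acc ++ pvSpecF (dps.drop k) := by
  intro l
  induction l with
  | nil =>
    intro k acc h
    have hlen : dps.length - 1 ≤ k := by
      have := congrArg List.length h.symm
      simp at this; omega
    have hz : pvSpecF (dps.drop k) = [] := by
      rcases h2 : dps.drop k with _ | ⟨d, r⟩
      · simp [pvSpecF]
      · have hr : r = [] := by
          have := congrArg List.length h2
          simp at this
          have : r.length = 0 := by omega
          simpa using this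
        subst hr
        simp [pvSpecF, pvFirstLow, List.take]
    simp [PySem.List.enumerate, hz]
  | cons d rest ih =>
    intro k acc h
    have hk : k < dps.length - 1 := by
      have := congrArg List.length h.symm
      simp at this; omega
    have hk' : k < dps.length := by omega
    have hkd : k < dps.dropLast.length := by simp; omega
    have hd : d = dps[k] := by
      have := congrArg (fun l => l[0]?) h.symm
      simp [List.getElem?_drop] at this
      rw [List.getElem?_eq_getElem hkd] at this
      simp at this
      exact this.symm
    have hrest : rest = dps.dropLast.drop (k + 1) := by
      have := congrArg List.tail h
      simpa [List.tail_drop] using this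
    have hdropk : dps.drop k = dps[k] :: dps.drop (k + 1) := List.drop_eq_getElem_cons hk'
    rw [PySem.List.enumerate_cons, List.foldl_cons]
    have hcast : ((k : Int) + 1) = ((k + 1 : Nat) : Int) := by push_cast; ring
    rw [hcast, ih (k + 1) _ hrest, hdropk]
    show pvBodyA dps acc ((k : Int), d) ++ pvSpecF (dps.drop (k + 1)) = _
    have hslice : PySem.List.slice dps (some ((k : Int) + 1)) (some ((k : Int) + 5)) =
        (dps.drop (k + 1)).take 4 := by
      have h5 : ((k : Int) + 5) = ((k + 1 : Nat) : Int) + ((4 : Nat) : Int) := by push_cast; ring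
      rw [hcast, h5, PySem.List.slice_natCast_add]
    rw [pvSpecF, pvBodyA, hslice, ← hd]
    by_cases hm : pvHigh d = true
    · simp [hm, pvScanA_eq, List.append_assoc]
    · simp [hm]

lemma pvPassB1 (dps : List (List (String × List (String × Int)))) :
    ∀ (i : Nat),
      ((PySem.List.pyRange (i : Int) (dps.length : Int) 1).foldr
          (fun x st => pvBodyRev dps st x) ([], none)).1.reverse = pvNlTab (dps.drop i) (i : Int)
      ∧ ((PySem.List.pyRange (i : Int) (dps.length : Int) 1).foldr
          (fun x st => pvBodyRev dps st x) ([], none)).2 = pvNextLow (dps.drop i) (i : Int) := by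
  intro i
  induction h : dps.length - i generalizing i with
  | zero =>
    have hni : dps.length ≤ i := by omega
    have hnil : PySem.List.pyRange (i : Int) (dps.length : Int) 1 = [] :=
      PySem.List.pyRange_one_eq_nil (by exact_mod_cast hni)
    rw [hnil, List.drop_eq_nil_of_le hni]
    simp [pvNlTab, pvNextLow]
  | succ m ih =>
    have hi : i < dps.length := by omega
    have hcons : PySem.List.pyRange (i : Int) (dps.length : Int) 1
        = (i : Int) :: PySem.List.pyRange ((i : Int) + 1) (dps.length : Int) 1 :=
      PySem.List.pyRange_one_cons (by exact_mod_cast hi)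
    have hcast : (((i + 1 : Nat)) : Int) = (i : Int) + 1 := by push_cast; ring
    obtain ⟨ih1, ih2⟩ := ih (i + 1) (by omega)
    rw [hcast] at ih1 ih2
    have hget : PySem.List.pyGetD dps ((i : Nat) : Int)
        ([] : List (String × List (String × Int))) = dps[i] := by
      rw [PySem.List.pyGetD_natCast]
      exact List.getD_eq_getElem _ _ hi
    have hdrop : dps.drop i = dps[i] :: dps.drop (i + 1) := List.drop_eq_getElem_cons hi
    rw [hcons, List.foldr_cons]
    set st' := List.foldr (fun x st => pvBodyRev dps st x)
        (([], none) : List (Option Int) × Option Int)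
        (PySem.List.pyRange ((i : Int) + 1) (dps.length : Int) 1) with hst
    rw [hdrop]
    simp only [pvBodyRev, hget, pvNlTab, pvNextLow]
    by_cases hm : pvLow dps[i] = true
    · simp [hm, ih1, ih2]
    · simp [hm, ih1, ih2]

lemma pvStepB (acc : List Int) (d : List (String × List (String × Int)))
    (r : List (List (String × List (String × Int)))) (k : Int) :
    pvBodyFwd acc (k, d, pvNextLow r (k + 1)) =
      acc ++ (if pvHigh d then pvFirstLow 1 (r.take 4) else []) := by
  rw [← pvFirstLow_eq_nextLow r (k + 1) 4 1]
  by_cases hm : pvHigh d = true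
  · rcases hnl : pvNextLow r (k + 1) with _ | j
    · simp [pvBodyFwd, hm]
    · have hge := pvNextLow_ge r (k + 1) j hnl
      simp only [pvBodyFwd, hm, if_true]
      show (if j - k ≤ 4 then acc ++ [j - k] else acc) =
        acc ++ (if j < k + 1 + ((4 : Nat) : Int) then [j - (k + 1) + 1] else [])
      by_cases h1 : j - k ≤ 4
      · rw [if_pos h1, if_pos (show j < k + 1 + ((4 : Nat) : Int) by push_cast; omega)]
        have hv : j - k = j - (k + 1) + 1 := by ring
        rw [hv]
      · rw [if_neg h1, if_neg (show ¬ j < k + 1 + ((4 : Nat) : Int) by push_cast; omega)]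
        simp
  · simp [pvBodyFwd, hm]

lemma pvLoopB (dps : List (List (String × List (String × Int)))) :
    ∀ (l : List ((List (String × List (String × Int))) × Option Int)) (k : Nat) (acc : List Int),
      l = (dps.drop k).zip (pvNlTab (dps.drop k) (k : Int)) →
      (PySem.List.enumerate l (k : Int)).foldl pvBodyFwd acc = acc ++ pvSpecF (dps.drop k) := by
  intro l
  induction l with
  | nil =>
    intro k acc h
    have hz : pvSpecF (dps.drop k) = [] := by
      rcases h2 : dps.drop k with _ | ⟨d, r⟩
      · simp [pvSpecF]
      · rw [h2] at h
        simp [pvNlTab] at h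
    rw [hz]
    simp [PySem.List.enumerate]
  | cons p rest ih =>
    intro k acc h
    rcases h2 : dps.drop k with _ | ⟨d, r⟩
    · rw [h2] at h; simp at h
    · have hr : r = dps.drop (k + 1) := by
        have := congrArg List.tail h2
        simp [List.tail_drop] at this
        exact this.symm
      rw [h2] at h
      simp only [pvNlTab, List.zip_cons_cons] at h
      injection h with hp hrest
      rw [PySem.List.enumerate_cons, List.foldl_cons]
      have hcast : ((k : Int) + 1) = ((k + 1 : Nat) : Int) := by push_cast; ring
      rw [hcast, ih (k + 1) _ (by rw [hrest, hr, hcast])]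
      rw [hp, pvStepB, ← hr]
      simp [pvSpecF, List.append_assoc]

lemma pvA_eq_spec (dps : List (List (String × List (String × Int)))) :
    recovery_distances_py dps = pvSpecF dps := by
  rw [recovery_distances_py, PySem.List.slice_to_neg_one]
  have := pvLoopA dps dps.dropLast 0 [] (by simp)
  simpa using this

lemma pvB_eq_spec (dps : List (List (String × List (String × Int)))) :
    recovery_distances_py_alt dps = pvSpecF dps := by
  have hrev : PySem.List.pyRange ((dps.length : Int) - 1) (-1) (-1)
      = (PySem.List.pyRange 0 (dps.length : Int) 1).reverse := by
    rw [PySem.List.pyRange_neg_one_eq_reverse]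
    norm_num
  rw [recovery_distances_py_alt]
  simp only [hrev, List.foldl_reverse]
  have h1' : ((PySem.List.pyRange 0 (dps.length : Int) 1).foldr
      (fun x st => pvBodyRev dps st x) ([], none)).1.reverse = pvNlTab dps 0 := by
    simpa using (pvPassB1 dps 0).1
  rw [h1']
  have := pvLoopB dps (dps.zip (pvNlTab dps 0)) 0 [] (by simp)
  simpa using this

-- ===== VERDICT (by name: the statement is the Claim_ definition above) =====
theorem recovery_distances_py_spec : Claim_equal_recovery_distances_py := by
  intro dps _ _
  unfold Spec_recovery_distances_py
  rw [pvA_eq_spec, pvB_eq_spec]
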